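-- pv_equiv track=rewrite | github.com/HaujetZhao/CapsWriter-Offline | util/client/shortcut/key_mapper.py | parse_combo_key
-- ===== SOURCE A (Python) =====
-- MODIFIER_KEYS = {'ctrl', 'alt', 'shift', 'cmd', 'win'}  # win 是 cmd 的别名
--
-- def parse_combo_key(combo: str) -> tuple:
--     """
--     解析组合键字符串
--
--     Args:
--         combo: 组合键字符串，如 'shift+cmd+a' 或 'ctrl+alt+delete'
--
--     Returns:
--         (modifiers, main_key): 修饰键集合和主键名称
--     """
--     parts = combo.lower().split('+')
--     modifiers = set()
--     main_key = None
--
--     for part in parts: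
--         part = part.strip()
--         if part in MODIFIER_KEYS:
--             modifiers.add(part)
--         else:
--             main_key = part
--
--     return modifiers, main_key
-- ===== SOURCE B (Python) =====
-- MODIFIER_KEYS = {'ctrl', 'alt', 'shift', 'cmd', 'win'}  # win 是 cmd 的别名
--
-- def parse_combo_key(combo: str) -> tuple:
--     parts = [p.strip() for p in combo.lower().split('+')]
--     modifiers = set(parts) & MODIFIER_KEYS
--     main_key = next((p for p in reversed(parts) if p not in MODIFIER_KEYS), None)
--     return modifiers, main_key
-- ===== Notes on version B (the rewrite author's own statement) =====
-- stated objective: idiomatic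
-- what changed: Replaces A's single accumulating loop with a declarative three-step pipeline: strip all parts up front, take modifiers as a set intersection, and find the main key by scanning the parts from the end for the last non-modifier.
import Mathlib
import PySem

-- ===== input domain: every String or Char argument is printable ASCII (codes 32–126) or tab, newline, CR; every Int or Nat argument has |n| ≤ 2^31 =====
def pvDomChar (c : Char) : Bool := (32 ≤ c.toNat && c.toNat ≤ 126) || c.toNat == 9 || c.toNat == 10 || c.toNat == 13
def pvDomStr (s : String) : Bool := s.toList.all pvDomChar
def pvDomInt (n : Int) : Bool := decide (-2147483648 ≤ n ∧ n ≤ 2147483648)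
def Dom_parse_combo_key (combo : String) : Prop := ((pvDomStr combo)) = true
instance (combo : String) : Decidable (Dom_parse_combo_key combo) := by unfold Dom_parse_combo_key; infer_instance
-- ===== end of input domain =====

-- B restates A's accumulating loop as a declarative pipeline: strip the parts once,
-- take the modifiers as a set intersection, and find the main key by a reversed scan
-- for the last non-modifier part (idiomatic; same cost).


-- s.split('+'): Str.split? with the non-empty literal separator (always `some`)
def pySplitPlus (s : String) : List String := (PySem.Str.split? s "+").getD []

-- module constant shared by both Pythons
def MODIFIER_KEYS : PySem.Set String := PySem.Set.ofList ["ctrl", "alt", "shift", "cmd", "win"]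

-- ===== PORT A =====
def parse_combo_key (combo : String) : List String × Option String :=
  let parts := pySplitPlus (PySem.Str.lower combo)
  let st := parts.foldl
    (fun (st : PySem.Set String × Option String) part =>
      let part := PySem.Str.strip part
      if PySem.Set.contains MODIFIER_KEYS part then
        (PySem.Set.add st.1 part, st.2)
      else
        (st.1, some part))
    (PySem.Set.empty, none)
  (st.1, st.2)

-- ===== PORT B =====
def parse_combo_key_alt (combo : String) : List String × Option String :=
  let parts := (pySplitPlus (PySem.Str.lower combo)).map PySem.Str.strip
  let modifiers := PySem.Set.inter (PySem.Set.ofList parts) MODIFIER_KEYS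
  let main_key := parts.reverse.find? (fun p => !(PySem.Set.contains MODIFIER_KEYS p))
  (modifiers, main_key)

-- ===== PRECONDITION & SPEC =====
def Spec_parse_combo_key (combo : String) (out : List String × Option String) : Prop := out = parse_combo_key_alt combo
instance (combo : String) (out : List String × Option String) : Decidable (Spec_parse_combo_key combo out) := by unfold Spec_parse_combo_key; infer_instance

-- ===== CLAIM (what is proved, stated in full; the proofs are below) =====
def Claim_equal_parse_combo_key : Prop := ∀ (combo : String), Dom_parse_combo_key combo → Spec_parse_combo_key combo (parse_combo_key combo)

-- ===== LEMMAS AND PROOFS =====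

-- membership in a filtered string list, on the Bool side
theorem contains_filter (s : List String) (c : String → Bool) (q : String) :
    (s.filter c).contains q = (s.contains q && c q) := by
  by_cases hc : c q
  · simp [List.mem_filter, hc]
  · simp [List.mem_filter, hc]

theorem filter_add (s : PySem.Set String) (c : String → Bool) (q : String) :
    (PySem.Set.add s q).filter c =
      (if c q then PySem.Set.add (s.filter c) q else s.filter c) := by
  have h2 : (s.filter c).contains q = (s.contains q && c q) := contains_filter s c q
  unfold PySem.Set.add
  by_cases hs : PySem.Set.contains s q
  · by_cases hc : c q
    · rw [if_pos hs, if_pos hc,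
        if_pos (show PySem.Set.contains (List.filter c s) q = true by
          simp only [PySem.Set.contains]; rw [h2]
          rw [hs, hc]; rfl)]
    · rw [if_pos hs, if_neg hc]
  · by_cases hc : c q
    · rw [if_neg hs, if_pos hc, List.filter_append,
        if_neg (show ¬ PySem.Set.contains (List.filter c s) q = true by
          simp only [PySem.Set.contains]; rw [h2]
          simp only [Bool.not_eq_true] at hs; rw [hs]; simp)]
      simp [List.filter, hc]
    · rw [if_neg hs, if_neg hc, List.filter_append]
      simp [List.filter, hc]

-- the modifier side: filtering set(l) by c equals the fold that only adds c-elements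
theorem filter_ofList (l : List String) (c : String → Bool) (s : PySem.Set String) :
    (l.foldl PySem.Set.add s).filter c =
      l.foldl (fun s q => if c q then PySem.Set.add s q else s) (s.filter c) := by
  induction l generalizing s with
  | nil => rfl
  | cons x l ih => simp [List.foldl, ih, filter_add]

-- the combined loop invariant: A's fold over the raw parts, from any state
theorem foldA_eq (l : List String) (s : PySem.Set String) (m : Option String) :
    (l.foldl
      (fun (st : PySem.Set String × Option String) part =>
        let part := PySem.Str.strip part
        if PySem.Set.contains MODIFIER_KEYS part then
          (PySem.Set.add st.1 part, st.2)
        else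
          (st.1, some part))
      (s, m)) =
    ((l.map PySem.Str.strip).foldl
        (fun s q => if PySem.Set.contains MODIFIER_KEYS q then PySem.Set.add s q else s) s,
      ((l.map PySem.Str.strip).reverse.find?
        (fun p => !(PySem.Set.contains MODIFIER_KEYS p))).or m) := by
  induction l generalizing s m with
  | nil => simp
  | cons x l ih =>
    simp only [List.map, List.reverse_cons, List.find?_append, List.foldl]
    by_cases hc : PySem.Set.contains MODIFIER_KEYS (PySem.Str.strip x)
    · rw [if_pos hc, if_pos hc, ih]
      have h1 : List.find? (fun p => !(PySem.Set.contains MODIFIER_KEYS p))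
          [PySem.Str.strip x] = none := by
        simp [List.find?, PySem.Set.contains] at hc ⊢; simp [hc]
      rw [h1, Option.or_none]
    · rw [if_neg hc, if_neg hc, ih]
      have h1 : List.find? (fun p => !(PySem.Set.contains MODIFIER_KEYS p))
          [PySem.Str.strip x] = some (PySem.Str.strip x) := by
        simp [List.find?, PySem.Set.contains] at hc ⊢; simp [hc]
      rw [h1, Option.or_assoc, Option.some_or]

theorem parse_combo_key_eq (combo : String) :
    parse_combo_key combo = parse_combo_key_alt combo := by
  unfold parse_combo_key parse_combo_key_alt PySem.Set.inter
  simp only [foldA_eq, Option.or_none]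
  refine congrArg (fun z => (z, _)) ?_
  have h := filter_ofList (((pySplitPlus (PySem.Str.lower combo))).map PySem.Str.strip)
      (fun q => PySem.Set.contains MODIFIER_KEYS q) PySem.Set.empty
  simpa [PySem.Set.ofList, PySem.Set.empty] using h.symm

-- ===== VERDICT (by name: the statement is the Claim_ definition above) =====
theorem parse_combo_key_spec : Claim_equal_parse_combo_key := by
  intro combo _
  exact parse_combo_key_eq combo
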